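-- pv_equiv track=rewrite | github.com/imhoffman/advent | 2016/07/two.py | parse_outsides
-- ===== SOURCE A (Python) =====
-- def parse_outsides ( s, p ):
--     if ']' in s:
--         n = s.find('[')
--         p.append( s[ 0:n ] )        # this cannot go inside the argument list
--         parse_outsides( s[ s.find(']')+1: ], p )
--     else:
--         p.append( s )
--     return p
-- ===== SOURCE B (Python) =====
-- def parse_outsides(s, p):
--     # iterative scan over the original string using start offsets;
--     # never rebuilds the remaining string
--     i = 0
--     while True:
--         j = s.find(']', i)
--         if j < 0:
--             p.append(s[i:])
--             return p
--         p.append(s[i:s.find('[', i)])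
--         i = j + 1
-- ===== Notes on version B (the rewrite author's own statement) =====
-- stated objective: alternative
-- what changed: Replaces A's tail recursion that re-slices and rebuilds the remaining string at every step with an iterative index-based scan that keeps a start offset into the original string and uses find(sub, i), never constructing intermediate remainder strings.
import Mathlib
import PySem

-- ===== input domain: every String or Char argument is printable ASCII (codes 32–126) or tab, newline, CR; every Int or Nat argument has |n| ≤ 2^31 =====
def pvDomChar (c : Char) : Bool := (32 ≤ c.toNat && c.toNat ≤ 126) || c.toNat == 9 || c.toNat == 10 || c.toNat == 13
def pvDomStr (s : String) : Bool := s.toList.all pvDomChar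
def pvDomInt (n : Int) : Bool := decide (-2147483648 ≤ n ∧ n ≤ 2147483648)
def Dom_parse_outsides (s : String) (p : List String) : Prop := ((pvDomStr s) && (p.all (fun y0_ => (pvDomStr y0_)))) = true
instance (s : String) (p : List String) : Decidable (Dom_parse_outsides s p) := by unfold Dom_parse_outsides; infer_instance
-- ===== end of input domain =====

-- B replaces A's recursion that re-slices and rebuilds the remaining string at every
-- step with an iterative index-based scan over the original string, using find(sub, i).
-- Both A and B append to the caller's list p; the theorems are about the return value.

-- ===== PORT A =====
-- literal transliteration of A: recursive, re-slicing the remaining string each call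
def parse_outsides (s : String) (p : List String) : List String :=
  if PySem.Str.isIn "]" s then
    let n := PySem.Str.find s "["
    parse_outsides (PySem.Str.slice s (some (PySem.Str.find s "]" + 1)) none)
      (p ++ [PySem.Str.slice s (some 0) (some n)])
  else
    p ++ [s]
termination_by s.toList.length
decreasing_by
  have hin : ("]".toList) <:+: s.toList := (PySem.Str.isIn_iff_infix "]" s).mp (by assumption)
  have hf : (0:Int) ≤ PySem.Str.find s "]" := by
    simpa using (PySem.Chars.find_nonneg_iff s.toList "]".toList).mpr hin
  have hne : s.toList ≠ [] := by
    intro h; rw [h] at hin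
    exact absurd (List.eq_nil_of_infix_nil hin) (by decide)
  have hlen : 1 ≤ s.toList.length := List.length_pos_iff.mpr hne
  have h1 : (0:Int) ≤ PySem.Str.find s "]" + 1 := by omega
  have ht : (PySem.Str.slice s (some (PySem.Str.find s "]" + 1)) none).toList
      = s.toList.drop (PySem.Str.find s "]" + 1).toNat := by
    rw [PySem.Str.toList_slice, PySem.Chars.slice_eq_listSlice, PySem.List.slice_from _ h1]
  rw [ht, List.length_drop]
  omega

-- ===== PORT B =====
-- findFrom past the end of the string returns -1 (used only for B's termination)
theorem pvFindFromGtLen (s sub : List Char) (i : Nat) (h : s.length < i) :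
    PySem.Chars.findFrom s sub (i : Int) none = -1 := by
  rw [PySem.Chars.findFrom]
  split_ifs <;> omega

-- B's loop: i is the current start offset into the original string s
def parseOutsidesGo (s : String) (i : Nat) (p : List String) : List String :=
  let j := PySem.Str.findFrom s "]" (i : Int)
  if j < 0 then
    p ++ [PySem.Str.slice s (some (i : Int)) none]
  else
    parseOutsidesGo s (j.toNat + 1)
      (p ++ [PySem.Str.slice s (some (i : Int)) (some (PySem.Str.findFrom s "[" (i : Int)))])
termination_by s.toList.length + 1 - i
decreasing_by
  rename_i hj
  have hj' : ¬ PySem.Str.findFrom s "]" (i : Int) < 0 := hj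
  have hle : i ≤ s.toList.length := by
    by_contra hgt
    have := pvFindFromGtLen s.toList "]".toList i (by omega)
    simp only [PySem.Str.findFrom_eq] at hj'
    omega
  have hij : (i : Int) ≤ PySem.Str.findFrom s "]" (i : Int) := by
    have := (PySem.Chars.findFrom_natCast_spec s.toList "]".toList i hle
      (by simp only [PySem.Str.findFrom_eq] at hj' ⊢; omega)).1
    simpa using this
  omega

def parse_outsides_alt (s : String) (p : List String) : List String :=
  parseOutsidesGo s 0 p

-- ===== PRECONDITION & SPEC =====
def Spec_parse_outsides (s : String) (p : List String) (out : List String) : Prop := out = parse_outsides_alt s p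
instance (s : String) (p : List String) (out : List String) : Decidable (Spec_parse_outsides s p out) := by unfold Spec_parse_outsides; infer_instance

-- ===== CLAIM =====
def Claim_equal_parse_outsides : Prop := ∀ (s : String) (p : List String), Dom_parse_outsides s p → Spec_parse_outsides s p (parse_outsides s p)

-- ===== LEMMAS AND PROOFS =====

-- the no-']' case: both sides append the rest of the string and stop
theorem pvBaseCase (s : String) (i : Nat) (hle : i ≤ s.toList.length)
    (hni : ¬ "]".toList <:+: s.toList.drop i) (p : List String) :
    parse_outsides (PySem.Str.slice s (some (i : Int)) none) p = parseOutsidesGo s i p := by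
  have htL : (PySem.Str.slice s (some (i : Int)) none).toList = s.toList.drop i := by
    rw [PySem.Str.toList_slice, PySem.Chars.slice_eq_listSlice,
      PySem.List.slice_from _ (by omega : (0:Int) ≤ (i:Int))]
    simp
  have hA : PySem.Str.isIn "]" (PySem.Str.slice s (some (i : Int)) none) = false := by
    rw [← Bool.not_eq_true, PySem.Str.isIn_iff_infix, htL]; exact hni
  have hB : PySem.Str.findFrom s "]" (i : Int) = -1 := by
    simp only [PySem.Str.findFrom_eq]
    exact (PySem.Chars.findFrom_natCast_eq_neg_one_iff s.toList "]".toList i hle).mpr hni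
  rw [parse_outsides.eq_def, parseOutsidesGo.eq_def]
  simp only [hA, hB, Bool.false_eq_true, if_false]
  norm_num

set_option maxHeartbeats 1000000 in
theorem pvGoEq (s : String) (m : Nat) : ∀ (i : Nat), i ≤ s.toList.length →
    s.toList.length - i ≤ m → ∀ p : List String,
    parse_outsides (PySem.Str.slice s (some (i : Int)) none) p = parseOutsidesGo s i p := by
  induction m with
  | zero =>
    intro i hle hm p
    refine pvBaseCase s i hle ?_ p
    have hdrop : s.toList.drop i = [] := List.drop_eq_nil_of_le (by omega)
    rw [hdrop]
    intro h
    exact absurd (List.eq_nil_of_infix_nil h) (by decide)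
  | succ m ih =>
    intro i hle hm p
    by_cases hcase : "]".toList <:+: s.toList.drop i
    · -- recursive step
      set t := PySem.Str.slice s (some (i : Int)) none with htdef
      have htL : t.toList = s.toList.drop i := by
        rw [htdef, PySem.Str.toList_slice, PySem.Chars.slice_eq_listSlice,
          PySem.List.slice_from _ (by omega : (0:Int) ≤ (i:Int))]
        simp
      clear_value t
      set f := PySem.Chars.find (s.toList.drop i) "]".toList with hfdef
      have hf0 : (0:Int) ≤ f := (PySem.Chars.find_nonneg_iff _ _).mpr hcase
      have hfnd : PySem.Str.find t "]" = f := by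
        rw [PySem.Str.find_eq, htL]
      have hAin : PySem.Str.isIn "]" t = true := by
        rw [PySem.Str.isIn_iff_infix, htL]; exact hcase
      have hpre : "]".toList <+: (s.toList.drop i).drop f.toNat := (PySem.Chars.find_spec hf0).1
      have hflt : i + f.toNat < s.toList.length := by
        have hne : (s.toList.drop i).drop f.toNat ≠ [] := by
          intro h; rw [h] at hpre
          exact absurd (List.prefix_nil.mp hpre) (by decide)
        have hpos := List.length_pos_iff.mpr hne
        rw [List.drop_drop, List.length_drop] at hpos
        omega
      have hjB : PySem.Str.findFrom s "]" (i : Int) = (i : Int) + f := by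
        simp only [PySem.Str.findFrom_eq]
        rw [PySem.Chars.findFrom_natCast _ _ i hle, ← hfdef, if_neg (by omega)]
      have hjneg : ¬ PySem.Str.findFrom s "]" (i : Int) < 0 := by rw [hjB]; omega
      set g := PySem.Chars.find (s.toList.drop i) "[".toList with hgdef
      have hgnd : PySem.Str.find t "[" = g := by
        rw [PySem.Str.find_eq, htL]
      have hkB : PySem.Str.findFrom s "[" (i : Int) = if g = -1 then -1 else (i : Int) + g := by
        simp only [PySem.Str.findFrom_eq]
        rw [PySem.Chars.findFrom_natCast _ _ i hle, ← hgdef]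
      have hg1 : (-1:Int) ≤ g := PySem.Chars.neg_one_le_find _ _
      -- the appended piece is the same string on both sides
      have hpiece : PySem.Str.slice t (some 0) (some (PySem.Str.find t "[")) =
          PySem.Str.slice s (some (i : Int)) (some (PySem.Str.findFrom s "[" (i : Int))) := by
        apply String.toList_inj.mp
        rw [hgnd, hkB]
        by_cases hg : g = -1
        · rw [if_pos hg]
          simp only [PySem.Str.toList_slice, PySem.Chars.slice_eq_listSlice, htL]
          rw [hg, PySem.List.slice_zero_start, PySem.List.slice_to_neg_one]
          -- both sides are s[i:len-1]: unfold the clamped slice and compare take/drop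
          simp only [PySem.List.slice, PySem.List.clampIdx]
          rw [List.dropLast_eq_take]
          split_ifs <;> try omega
          simp only [Int.toNat_natCast, List.length_drop, Nat.min_eq_left hle]
          congr 1
          omega
        · rw [if_neg hg]
          simp only [PySem.Str.toList_slice, PySem.Chars.slice_eq_listSlice, htL]
          rw [PySem.List.slice_zero_start, PySem.List.slice_to _ (by omega : (0:Int) ≤ g),
            PySem.List.slice_toNat _ (by omega : (0:Int) ≤ (i:Int)) (by omega : (0:Int) ≤ (i:Int) + g)]
          congr 1
          omega
      -- the remaining string A recurses on is s sliced from the new index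
      have hrest : PySem.Str.slice t (some (PySem.Str.find t "]" + 1)) none =
          PySem.Str.slice s (some (((PySem.Str.findFrom s "]" (i : Int)).toNat + 1 : Nat) : Int)) none := by
        apply String.toList_inj.mp
        rw [hfnd, hjB]
        simp only [PySem.Str.toList_slice, PySem.Chars.slice_eq_listSlice, htL]
        rw [PySem.List.slice_from _ (by omega : (0:Int) ≤ f + 1),
          PySem.List.slice_from _ (by omega : (0:Int) ≤ ((((i:Int) + f).toNat + 1 : Nat) : Int)),
          List.drop_drop, Int.toNat_natCast]
        congr 1
        omega
      -- unfold one step of each program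
      rw [parse_outsides.eq_def, parseOutsidesGo.eq_def]
      simp only [if_pos hAin, if_neg hjneg]
      rw [hpiece, hrest]
      exact ih ((PySem.Str.findFrom s "]" (i : Int)).toNat + 1)
        (by rw [hjB]; omega) (by rw [hjB]; omega) _
    · exact pvBaseCase s i hle hcase p

-- ===== VERDICT =====
theorem parse_outsides_spec : Claim_equal_parse_outsides := by
  intro s p _
  unfold Spec_parse_outsides parse_outsides_alt
  have h := pvGoEq s s.toList.length 0 (by omega) (by omega) p
  have h0 : PySem.Str.slice s (some ((0 : Nat) : Int)) none = s := by
    apply String.toList_inj.mp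
    rw [PySem.Str.toList_slice, PySem.Chars.slice_eq_listSlice,
      PySem.List.slice_from _ (by omega)]
    simp
  rw [h0] at h
  exact h
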